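-- pv_equiv track=rewrite | github.com/k-harada/AtCoder | ABC/ABC251-300/ABC300/D.py | solve
-- ===== SOURCE A (Python) =====
-- from bisect import bisect_right
--
-- def solve(n):
--     primes = [1] * (10 ** 6)
--     primes[0] = 0
--     primes[1] = 0
--     for p in range(10 ** 6):
--         if primes[p] == 1:
--             for q in range(p * p, 10 ** 6, p):
--                 primes[q] = 0
--     res = 0
--     primes = [p for p in range(10 ** 6) if primes[p]]
--     for k in range(2, len(primes)):
--         c = primes[k]
--         m0 = c ** 2
--         if m0 > n:
--             break
--         for i in range(k):
--             a = primes[i]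
--             m1 = m0 * (a ** 2)
--             if m1 * a >= n:
--                 break
--             r = n // m1
--             bc = bisect_right(primes, r)
--             bc = min(bc, k)
--             if bc > i + 1:
--                 res += bc - (i + 1)
--
--     return res
-- ===== SOURCE B (Python) =====
-- from bisect import bisect_right
-- from math import isqrt
-- from itertools import takewhile
--
--
-- def solve(n):
--     # same sieve as A, producing the sorted list of primes below 10**6
--     primes = [1] * (10 ** 6)
--     primes[0] = 0
--     primes[1] = 0
--     for p in range(10 ** 6):
--         if primes[p] == 1:
--             for q in range(p * p, 10 ** 6, p):
--                 primes[q] = 0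
--     primes = [p for p in range(10 ** 6) if primes[p]]
--     # Pivot on the MIDDLE prime b instead of A's largest prime c.
--     # Feasible middle primes are a prefix of `primes` (the predicate is
--     # antitone along the sorted list), so take it once with takewhile;
--     # for each b = mids[j] the feasible smaller primes a are again a
--     # prefix of primes[:j].  For such a pair, the largest primes c with
--     # a*a*b*c*c <= n are exactly those with c <= isqrt(n // (a*a*b)),
--     # counted by one bisect; b itself qualifies, so the count of c > b
--     # is bisect_right(primes, lim) - (j + 1) (never negative).
--     mids = list(takewhile(lambda b: 4 * b * (b + 1) ** 2 <= n, primes))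
--     res = 0
--     for j in range(len(mids)):
--         b = mids[j]
--         for a in takewhile(lambda a: a * a * b * (b + 1) ** 2 <= n, primes[:j]):
--             res += bisect_right(primes, isqrt(n // (a * a * b))) - (j + 1)
--     return res
-- ===== Notes on version B (the rewrite author's own statement) =====
-- stated objective: alternative
-- what changed: Keeps the sieve but pivots on the middle prime b instead of the largest prime c: the feasible middle primes are taken once as a takewhile prefix, and for each pair a<b one bisect on c <= isqrt(n // (a*a*b)) counts all admissible largest primes directly, replacing A's loop over c with a capped bisect for the middle prime; the loops are prefix iterations (takewhile) with no break or min-capping.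
import Mathlib
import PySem

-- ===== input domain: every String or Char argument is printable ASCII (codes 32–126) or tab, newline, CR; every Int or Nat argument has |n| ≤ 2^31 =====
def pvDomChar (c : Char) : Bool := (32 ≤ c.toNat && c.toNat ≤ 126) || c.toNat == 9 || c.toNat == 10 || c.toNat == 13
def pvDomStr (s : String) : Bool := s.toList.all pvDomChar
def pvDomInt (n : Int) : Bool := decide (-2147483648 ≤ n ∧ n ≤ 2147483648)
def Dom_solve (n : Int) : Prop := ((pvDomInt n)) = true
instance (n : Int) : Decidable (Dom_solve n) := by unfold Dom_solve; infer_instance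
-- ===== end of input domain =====

-- B pivots on the middle prime b: feasible middle primes are one takewhile prefix and for each
-- pair a<b one bisect on isqrt(n // (a*a*b)) counts the largest primes c directly — instead of
-- A's pivot on the largest prime c with a capped bisect for the middle prime (the sieve is
-- identical source text in both Pythons; alternative decomposition, no speed claim).


-- ===== PORT A =====
-- The sieve is IDENTICAL source text in A and B (B keeps it), so it is one shared helper.
-- Python's mutable list of 0/1 flags is ported as an Array Int; every Python write
-- `primes[q] = 0` has 0 ≤ q < 10**6, so setIfInBounds is exact there.
def pvSieveStep (arr : Array Int) (p : Nat) : Array Int :=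
  if arr.getD p 0 == 1 then
    (PySem.List.pyRange ((p : Int) * p) 1000000 (p : Int)).foldl
      (fun a q => a.setIfInBounds q.toNat 0) arr
  else arr

def pvSieveArr : Array Int :=
  (List.range 1000000).foldl pvSieveStep
    (((Array.replicate 1000000 (1 : Int)).setIfInBounds 0 0).setIfInBounds 1 0)

-- primes = [p for p in range(10 ** 6) if primes[p]]
def pvPrimes : List Int :=
  ((List.range 1000000).filter (fun p => pvSieveArr.getD p 0 != 0)).map
    (fun p : Nat => (p : Int))

-- A's inner `for i in range(k)` with its break (res threaded as accumulator)
def solveAInner (ps : List Int) (n m0 : Int) (k i : Nat) (res : Int) : Int :=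
  if i < k then
    let a := ps.getD i 0
    let m1 := m0 * a ^ 2
    if m1 * a ≥ n then res
    else
      let r := PySem.Int.floordiv n m1
      let bc := min (PySem.List.bisectRight ps r) k
      solveAInner ps n m0 k (i + 1) (if bc > i + 1 then res + ((bc : Int) - ((i : Int) + 1)) else res)
  else res
termination_by k - i

-- A's outer `for k in range(2, len(primes))` with its break
def solveAOuter (ps : List Int) (n : Int) (k : Nat) (res : Int) : Int :=
  if k < ps.length then
    let c := ps.getD k 0
    let m0 := c ^ 2
    if m0 > n then res
    else solveAOuter ps n (k + 1) (solveAInner ps n m0 k 0 res)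
  else res
termination_by ps.length - k

def solve (n : Int) : Int := solveAOuter pvPrimes n 2 0

-- ===== PORT B =====
-- itertools.takewhile → List.takeWhile; the slice primes[:j] (j ≥ 0) → List.take j;
-- math.isqrt(m) → Nat.sqrt on toNat (m ≥ 0 at every reachable call, exact there).
-- mids = list(takewhile(lambda b: 4 * b * (b + 1) ** 2 <= n, primes))
def pvBMids (ps : List Int) (n : Int) : List Int :=
  ps.takeWhile (fun b => decide (4 * b * (b + 1) ^ 2 ≤ n))

-- takewhile(lambda a: a * a * b * (b + 1) ** 2 <= n, primes[:j])
def pvBSmalls (ps : List Int) (n b : Int) (j : Nat) : List Int :=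
  (ps.take j).takeWhile (fun a => decide (a * a * b * (b + 1) ^ 2 ≤ n))

-- bisect_right(primes, isqrt(n // (a * a * b))) - (j + 1)
def pvBCount (ps : List Int) (n b : Int) (j : Nat) (a : Int) : Int :=
  (PySem.List.bisectRight ps
      ((Nat.sqrt (PySem.Int.floordiv n (a * a * b)).toNat : Nat) : Int) : Int)
    - ((j : Int) + 1)

-- for j in range(len(mids)): b = mids[j]; for a in takewhile(...): res += ...
def pvBLoop (ps : List Int) (n : Int) : Int :=
  (List.range (pvBMids ps n).length).foldl
    (fun res j =>
      (pvBSmalls ps n ((pvBMids ps n).getD j 0) j).foldl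
        (fun r a => r + pvBCount ps n ((pvBMids ps n).getD j 0) j a) res) 0

def solve_alt (n : Int) : Int := pvBLoop pvPrimes n

-- ===== PRECONDITION & SPEC =====
def Spec_solve (n : Int) (out : Int) : Prop := out = solve_alt n
instance (n : Int) (out : Int) : Decidable (Spec_solve n out) := by unfold Spec_solve; infer_instance

-- ===== CLAIM (what is proved, stated in full; the proofs are below) =====
def Claim_equal_solve : Prop := ∀ (n : Int), Dom_solve n → Spec_solve n (solve n)

-- ===== LEMMAS AND PROOFS =====

-- the 0/1 contribution of an index triple (i, j, k): 1 iff i < j < k and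
-- primes[i]^2 * primes[j] * primes[k]^2 ≤ n; both loop nests sum exactly these.
def tri (ps : List Int) (n : Int) (i j k : Nat) : Int :=
  if i < j ∧ j < k ∧ (ps.getD i 0) ^ 2 * ps.getD j 0 * (ps.getD k 0) ^ 2 ≤ n then 1 else 0

lemma getD_strict {ps : List Int} (hs : ps.Pairwise (· < ·)) {i j : Nat}
    (hij : i < j) (hj : j < ps.length) : ps.getD i 0 < ps.getD j 0 := by
  have hi : i < ps.length := lt_trans hij hj
  rw [List.getD_eq_getElem _ _ hi, List.getD_eq_getElem _ _ hj]
  exact List.pairwise_iff_getElem.mp hs i j hi hj hij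

lemma getD_mono {ps : List Int} (hs : ps.Pairwise (· < ·)) {i j : Nat}
    (hij : i ≤ j) (hj : j < ps.length) : ps.getD i 0 ≤ ps.getD j 0 := by
  rcases Nat.lt_or_ge i j with h | h
  · exact le_of_lt (getD_strict hs h hj)
  · have : i = j := le_antisymm hij h
    simp [this]

lemma getD_ge2 {ps : List Int} (h2 : ∀ x ∈ ps, 2 ≤ x) {i : Nat}
    (hi : i < ps.length) : 2 ≤ ps.getD i 0 := by
  rw [List.getD_eq_getElem _ _ hi]
  exact h2 _ (List.getElem_mem hi)

lemma bisect_iff {ps : List Int} (hs : ps.Pairwise (· < ·)) (x : Int) {j : Nat}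
    (hj : j < ps.length) : ps.getD j 0 ≤ x ↔ j < PySem.List.bisectRight ps x := by
  have hle : ps.Pairwise (· ≤ ·) := hs.imp le_of_lt
  obtain ⟨-, h1, h2⟩ := PySem.List.bisectRight_spec ps x hle
  rw [List.getD_eq_getElem _ _ hj]
  constructor
  · intro h
    by_contra hc
    exact absurd h (not_le.mpr (h2 j hj (Nat.le_of_not_lt hc)))
  · intro h
    exact h1 j hj h

lemma bisect_le_length {ps : List Int} (hs : ps.Pairwise (· < ·)) (x : Int) :
    PySem.List.bisectRight ps x ≤ ps.length :=
  (PySem.List.bisectRight_spec ps x (hs.imp le_of_lt)).1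

lemma sum_ite_interval (N lo hi : Nat) (hhi : hi ≤ N) (P : Nat → Prop) [DecidablePred P]
    (h : ∀ j < N, P j ↔ (lo ≤ j ∧ j < hi)) :
    (∑ j ∈ Finset.range N, if P j then (1 : Int) else 0) = ((hi - lo : Nat) : Int) := by
  rw [Finset.sum_boole]
  have : {x ∈ Finset.range N | P x} = Finset.Ico lo hi := by
    ext j
    simp only [Finset.mem_filter, Finset.mem_range, Finset.mem_Ico]
    constructor
    · rintro ⟨hjN, hP⟩; exact (h j hjN).mp hP
    · rintro ⟨h1, h2⟩
      have hjN : j < N := lt_of_lt_of_le h2 hhi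
      exact ⟨hjN, (h j hjN).mpr ⟨h1, h2⟩⟩
  rw [this, Nat.card_Ico]

lemma arithA_inner {a0 a b c n : Int} (ha0 : 2 ≤ a0) (haa : a0 ≤ a) (hb : a < b)
    (hc : 2 ≤ c) (hbrk : c ^ 2 * a0 ^ 2 * a0 ≥ n) : n < a ^ 2 * b * c ^ 2 := by
  have hc2 : (0:ℤ) < c ^ 2 := by nlinarith
  have ha2 : (0:ℤ) < a ^ 2 := by nlinarith
  have h1 : a0 ^ 2 * a0 ≤ a ^ 2 * a := by nlinarith [sq_nonneg (a - a0), sq_nonneg (a + a0)]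
  calc n ≤ c ^ 2 * a0 ^ 2 * a0 := hbrk
    _ = c ^ 2 * (a0 ^ 2 * a0) := by ring
    _ ≤ c ^ 2 * (a ^ 2 * a) := mul_le_mul_of_nonneg_left h1 (le_of_lt hc2)
    _ < c ^ 2 * (a ^ 2 * b) := mul_lt_mul_of_pos_left (mul_lt_mul_of_pos_left hb ha2) hc2
    _ = a ^ 2 * b * c ^ 2 := by ring

lemma innerA_eq {ps : List Int} (hs : ps.Pairwise (· < ·)) (h2 : ∀ x ∈ ps, 2 ≤ x)
    {n : Int} {k : Nat} (hk : k < ps.length) :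
    ∀ i0 res, solveAInner ps n ((ps.getD k 0) ^ 2) k i0 res
      = res + ∑ i ∈ Finset.Ico i0 k, ∑ j ∈ Finset.range ps.length, tri ps n i j k := by
  suffices H : ∀ m i0 res, k - i0 ≤ m → solveAInner ps n ((ps.getD k 0) ^ 2) k i0 res
      = res + ∑ i ∈ Finset.Ico i0 k, ∑ j ∈ Finset.range ps.length, tri ps n i j k by
    exact fun i0 res => H (k - i0) i0 res le_rfl
  intro m
  induction m with
  | zero =>
    intro i0 res hm
    have hik : ¬ i0 < k := by omega
    rw [solveAInner]
    simp [hik, Finset.Ico_eq_empty hik]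
  | succ m ih =>
    intro i0 res hm
    rw [solveAInner]
    by_cases hik : i0 < k
    · simp only [if_pos hik]
      set a0 := ps.getD i0 0 with ha0def
      have hi0len : i0 < ps.length := lt_trans hik hk
      have ha0 : 2 ≤ a0 := getD_ge2 h2 hi0len
      have hcge : 2 ≤ ps.getD k 0 := getD_ge2 h2 hk
      by_cases hbrk : (ps.getD k 0) ^ 2 * a0 ^ 2 * a0 ≥ n
      · simp only [if_pos hbrk]
        symm
        rw [add_eq_left]
        apply Finset.sum_eq_zero
        intro i hi
        apply Finset.sum_eq_zero
        intro j hj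
        rw [Finset.mem_Ico] at hi
        rw [Finset.mem_range] at hj
        unfold tri
        rw [if_neg]
        rintro ⟨hij, hjk, hcond⟩
        have hjlen : j < ps.length := hj
        have hilen : i < ps.length := lt_trans hij hjlen
        have : n < (ps.getD i 0) ^ 2 * ps.getD j 0 * (ps.getD k 0) ^ 2 :=
          arithA_inner ha0 (getD_mono hs hi.1 hilen) (getD_strict hs hij hjlen) hcge hbrk
        linarith
      · simp only [if_neg hbrk]
        rw [ih (i0 + 1) _ (by omega)]
        rw [Finset.sum_eq_sum_Ico_succ_bot hik]
        have hcpos : (0:ℤ) < ps.getD k 0 := by linarith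
        have hapos : (0:ℤ) < a0 := by linarith
        have hm1pos : (0:ℤ) < (ps.getD k 0) ^ 2 * a0 ^ 2 := mul_pos (pow_pos hcpos 2) (pow_pos hapos 2)
        set r := PySem.Int.floordiv n ((ps.getD k 0) ^ 2 * a0 ^ 2) with hrdef
        set bc := PySem.List.bisectRight ps r with hbcdef
        have hbcle : bc ≤ ps.length := bisect_le_length hs r
        have hhi : min bc k ≤ ps.length := le_trans (min_le_right _ _) (le_of_lt hk)
        have hF : (∑ j ∈ Finset.range ps.length, tri ps n i0 j k)
            = ((min bc k - (i0 + 1) : Nat) : Int) := by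
          unfold tri
          apply sum_ite_interval _ _ _ hhi
          intro j hjN
          constructor
          · rintro ⟨hij, hjk, hcond⟩
            have hler : ps.getD j 0 ≤ r := by
              rw [hrdef, PySem.Int.le_floordiv_iff_mul_le hm1pos]
              nlinarith [hcond]
            have hjbc : j < bc := (bisect_iff hs r hjN).mp hler
            exact ⟨by omega, lt_min hjbc hjk⟩
          · rintro ⟨hlo, hhi2⟩
            refine ⟨by omega, lt_of_lt_of_le hhi2 (min_le_right _ _), ?_⟩
            have hler : ps.getD j 0 ≤ r :=
              (bisect_iff hs r hjN).mpr (lt_of_lt_of_le hhi2 (min_le_left _ _))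
            rw [hrdef, PySem.Int.le_floordiv_iff_mul_le hm1pos] at hler
            nlinarith [hler]
        rw [hF]
        have hle1 : i0 + 1 ≤ k := hik
        by_cases hgt : min bc k > i0 + 1
        · rw [if_pos hgt]
          push_cast [Nat.sub_add_cancel]
          omega
        · rw [if_neg hgt]
          have : min bc k - (i0 + 1) = 0 := by omega
          rw [this]
          push_cast
          ring
    · simp [hik, Finset.Ico_eq_empty hik]

lemma arithA_outer {a b c c0 n : Int} (ha : 2 ≤ a) (hb : a < b) (hc : c0 ≤ c)
    (hc0 : 2 ≤ c0) (hn : n < c0 ^ 2) : n < a ^ 2 * b * c ^ 2 := by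
  have h1 : c0 ^ 2 ≤ c ^ 2 := by nlinarith
  have h2 : (1:ℤ) ≤ a ^ 2 * b := by nlinarith
  calc n < c0 ^ 2 := hn
    _ ≤ c ^ 2 := h1
    _ = 1 * c ^ 2 := (one_mul _).symm
    _ ≤ a ^ 2 * b * c ^ 2 := mul_le_mul_of_nonneg_right h2 (sq_nonneg c)

lemma outerA_eq {ps : List Int} (hs : ps.Pairwise (· < ·)) (h2 : ∀ x ∈ ps, 2 ≤ x) (n : Int) :
    ∀ k0 res, solveAOuter ps n k0 res
      = res + ∑ k ∈ Finset.Ico k0 ps.length, ∑ i ∈ Finset.range ps.length,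
          ∑ j ∈ Finset.range ps.length, tri ps n i j k := by
  suffices H : ∀ m k0 res, ps.length - k0 ≤ m → solveAOuter ps n k0 res
      = res + ∑ k ∈ Finset.Ico k0 ps.length, ∑ i ∈ Finset.range ps.length,
          ∑ j ∈ Finset.range ps.length, tri ps n i j k by
    exact fun k0 res => H (ps.length - k0) k0 res le_rfl
  intro m
  induction m with
  | zero =>
    intro k0 res hm
    have hk : ¬ k0 < ps.length := by omega
    rw [solveAOuter]
    simp [hk, Finset.Ico_eq_empty hk]
  | succ m ih =>
    intro k0 res hm
    rw [solveAOuter]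
    by_cases hk : k0 < ps.length
    · simp only [if_pos hk]
      have hc0 : 2 ≤ ps.getD k0 0 := getD_ge2 h2 hk
      by_cases hbrk : (ps.getD k0 0) ^ 2 > n
      · simp only [if_pos hbrk]
        symm
        rw [add_eq_left]
        apply Finset.sum_eq_zero
        intro k hkmem
        rw [Finset.mem_Ico] at hkmem
        apply Finset.sum_eq_zero
        intro i hi
        apply Finset.sum_eq_zero
        intro j hj
        rw [Finset.mem_range] at hi hj
        unfold tri
        rw [if_neg]
        rintro ⟨hij, hjk, hcond⟩
        have : n < (ps.getD i 0) ^ 2 * ps.getD j 0 * (ps.getD k 0) ^ 2 :=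
          arithA_outer (getD_ge2 h2 hi) (getD_strict hs hij hj)
            (getD_mono hs hkmem.1 hkmem.2) hc0 hbrk
        linarith
      · simp only [if_neg hbrk]
        rw [ih (k0 + 1) _ (by omega),
            innerA_eq hs h2 hk 0 res,
            Finset.sum_eq_sum_Ico_succ_bot hk]
        have hsplit : ∑ i ∈ Finset.Ico 0 k0, ∑ j ∈ Finset.range ps.length, tri ps n i j k0
            = ∑ i ∈ Finset.range ps.length, ∑ j ∈ Finset.range ps.length, tri ps n i j k0 := by
          rw [Finset.range_eq_Ico,
              ← Finset.sum_Ico_consecutive _ (Nat.zero_le k0) (le_of_lt hk)]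
          have : ∑ i ∈ Finset.Ico k0 ps.length, ∑ j ∈ Finset.Ico 0 ps.length, tri ps n i j k0
              = 0 := by
            apply Finset.sum_eq_zero
            intro i hi
            rw [Finset.mem_Ico] at hi
            apply Finset.sum_eq_zero
            intro j hj
            unfold tri
            rw [if_neg]
            rintro ⟨hij, hjk, -⟩
            omega
          rw [this, add_zero]
        rw [hsplit]
        ring
    · simp [hk, Finset.Ico_eq_empty hk]

lemma arithB_outer {a b b0 c n : Int} (ha : 2 ≤ a) (hb0 : 2 ≤ b0) (hbb : b0 ≤ b)
    (hc : b < c) (hbrk : 4 * b0 * (b0 + 1) ^ 2 > n) : n < a ^ 2 * b * c ^ 2 := by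
  have h1 : 4 * b0 * (b0 + 1) ^ 2 ≤ 4 * b * (b + 1) ^ 2 := by
    nlinarith [sq_nonneg (b - b0), sq_nonneg (b + b0), mul_nonneg (sub_nonneg.mpr hbb) (sq_nonneg (b + b0 + 2))]
  have hb2 : (2:ℤ) ≤ b := le_trans hb0 hbb
  have hnn : (0:ℤ) ≤ b * (b + 1) ^ 2 := mul_nonneg (by linarith) (sq_nonneg _)
  have h2 : 4 * b * (b + 1) ^ 2 ≤ a ^ 2 * b * (b + 1) ^ 2 := by
    have h4 : (4:ℤ) ≤ a ^ 2 := by nlinarith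
    calc 4 * b * (b + 1) ^ 2 = 4 * (b * (b + 1) ^ 2) := by ring
      _ ≤ a ^ 2 * (b * (b + 1) ^ 2) := mul_le_mul_of_nonneg_right h4 hnn
      _ = a ^ 2 * b * (b + 1) ^ 2 := by ring
  have h3 : a ^ 2 * b * (b + 1) ^ 2 ≤ a ^ 2 * b * c ^ 2 := by
    have hbc : (b + 1) ^ 2 ≤ c ^ 2 := by nlinarith
    have hab : (0:ℤ) ≤ a ^ 2 * b := mul_nonneg (sq_nonneg _) (by linarith)
    exact mul_le_mul_of_nonneg_left hbc hab
  linarith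

lemma arithB_inner {a0 a b c n : Int} (ha0 : 2 ≤ a0) (haa : a0 ≤ a) (hb : 2 ≤ b)
    (hc : b < c) (hbrk : a0 * a0 * b * (b + 1) ^ 2 > n) : n < a ^ 2 * b * c ^ 2 := by
  have hnn : (0:ℤ) ≤ b * (b + 1) ^ 2 := mul_nonneg (by linarith) (sq_nonneg _)
  have h1 : a0 * a0 * b * (b + 1) ^ 2 ≤ a ^ 2 * b * (b + 1) ^ 2 := by
    have haa2 : a0 * a0 ≤ a ^ 2 := by nlinarith
    calc a0 * a0 * b * (b + 1) ^ 2 = a0 * a0 * (b * (b + 1) ^ 2) := by ring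
      _ ≤ a ^ 2 * (b * (b + 1) ^ 2) := mul_le_mul_of_nonneg_right haa2 hnn
      _ = a ^ 2 * b * (b + 1) ^ 2 := by ring
  have h2 : a ^ 2 * b * (b + 1) ^ 2 ≤ a ^ 2 * b * c ^ 2 := by
    have hbc : (b + 1) ^ 2 ≤ c ^ 2 := by nlinarith
    have hab : (0:ℤ) ≤ a ^ 2 * b := mul_nonneg (sq_nonneg _) (by linarith)
    exact mul_le_mul_of_nonneg_left hbc hab
  linarith

lemma limit_iff {a b n : Int} (c : Int) (ha : 0 < a) (hb : 0 < b) (hc : 0 ≤ c) (hn : 0 ≤ n) :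
    a ^ 2 * b * c ^ 2 ≤ n ↔
      c ≤ ((Nat.sqrt (PySem.Int.floordiv n (a * a * b)).toNat : Nat) : Int) := by
  have hd : 0 < a * a * b := mul_pos (mul_pos ha ha) hb
  have hq0 : 0 ≤ PySem.Int.floordiv n (a * a * b) :=
    (PySem.Int.le_floordiv_iff_mul_le hd).mpr (by simpa using hn)
  rw [show a ^ 2 * b * c ^ 2 = c * c * (a * a * b) by ring,
     ← PySem.Int.le_floordiv_iff_mul_le hd, ← Int.toNat_le, Nat.le_sqrt,
     ← Nat.cast_le (α := Int)]
  push_cast [Int.toNat_of_nonneg hc, Int.toNat_of_nonneg hq0]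
  exact Iff.rfl

-- ---- generic fold/takeWhile bookkeeping for the B side ----
lemma foldl_add_gen {α : Type} (step : Int → α → Int) (f : α → Int)
    (h : ∀ r x, step r x = r + f x) : ∀ (l : List α) (res : Int),
    l.foldl step res = res + (l.map f).sum := by
  intro l
  induction l with
  | nil => intro res; simp
  | cons x t ih =>
    intro res
    rw [List.foldl_cons, h, ih, List.map_cons, List.sum_cons]
    ring

lemma sum_map_range (f : Nat → Int) : ∀ M : Nat,
    ((List.range M).map f).sum = ∑ j ∈ Finset.range M, f j := by
  intro M
  induction M with
  | zero => simp
  | succ m ih =>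
    rw [List.range_succ, List.map_append, List.sum_append, Finset.sum_range_succ, ih]
    simp

lemma map_sum_getD (f : Int → Int) : ∀ (l : List Int),
    (l.map f).sum = ∑ i ∈ Finset.range l.length, f (l.getD i 0) := by
  intro l
  induction l with
  | nil => simp
  | cons x t ih =>
    rw [List.map_cons, List.sum_cons, ih, List.length_cons, Finset.sum_range_succ']
    simp
    ring

lemma getD_take (l : List Int) (m i : Nat) (hi : i < m) (hil : i < l.length) :
    (l.take m).getD i 0 = l.getD i 0 := by
  have h1 : i < (l.take m).length := by simp [List.length_take]; omega
  rw [List.getD_eq_getElem _ _ h1, List.getD_eq_getElem _ _ hil]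
  simp [List.getElem_take]

lemma tw_length_le {p : Int → Bool} (l : List Int) :
    (l.takeWhile p).length ≤ l.length :=
  (List.takeWhile_sublist p).length_le

lemma tw_eq_take {p : Int → Bool} (l : List Int) :
    l.takeWhile p = l.take (l.takeWhile p).length :=
  List.prefix_iff_eq_take.mp (List.takeWhile_prefix p)

lemma tw_getD {p : Int → Bool} {l : List Int} {i : Nat}
    (hi : i < (l.takeWhile p).length) :
    (l.takeWhile p).getD i 0 = l.getD i 0 := by
  have hil : i < l.length := lt_of_lt_of_le hi (tw_length_le l)
  conv_lhs => rw [tw_eq_take l]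
  exact getD_take l _ i hi hil

lemma tw_holds {p : Int → Bool} {l : List Int} {i : Nat}
    (hi : i < (l.takeWhile p).length) : p (l.getD i 0) = true := by
  have hmem : (l.takeWhile p).getD i 0 ∈ l.takeWhile p := by
    rw [List.getD_eq_getElem _ _ hi]
    exact List.getElem_mem hi
  have hp := List.mem_takeWhile_imp hmem
  rwa [tw_getD hi] at hp

lemma tw_stop {p : Int → Bool} : ∀ (l : List Int),
    (l.takeWhile p).length < l.length →
    p (l.getD (l.takeWhile p).length 0) = false := by
  intro l
  induction l with
  | nil => simp
  | cons x t ih =>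
    intro h
    by_cases hx : p x
    · simp only [List.takeWhile_cons_of_pos hx, List.length_cons, List.getD_cons_succ] at h ⊢
      exact ih (by omega)
    · rw [List.takeWhile_cons_of_neg hx]
      simpa using hx

-- Σ_k tri for a fixed admissible pair (i, j): exactly B's one bisect count
lemma countK {ps : List Int} (hs : ps.Pairwise (· < ·)) (h2 : ∀ x ∈ ps, 2 ≤ x)
    {n : Int} {i j : Nat} (hij : i < j) (hj : j < ps.length)
    (hpred : ps.getD i 0 * ps.getD i 0 * ps.getD j 0 * (ps.getD j 0 + 1) ^ 2 ≤ n) :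
    (∑ k ∈ Finset.range ps.length, tri ps n i j k)
      = pvBCount ps n (ps.getD j 0) j (ps.getD i 0) := by
  unfold pvBCount
  set a0 := ps.getD i 0 with ha0def
  set b := ps.getD j 0 with hbdef
  have hilen : i < ps.length := lt_trans hij hj
  have ha0 : 2 ≤ a0 := getD_ge2 h2 hilen
  have hb2 : 2 ≤ b := getD_ge2 h2 hj
  have hapos : (0:ℤ) < a0 := by linarith
  have hbpos : (0:ℤ) < b := by linarith
  have hab : (0:ℤ) ≤ a0 * a0 * b :=
    mul_nonneg (mul_nonneg (by linarith) (by linarith)) (by linarith)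
  have hn0 : (0:ℤ) ≤ n := le_trans (mul_nonneg hab (sq_nonneg _)) hpred
  set lim : Int := ((Nat.sqrt (PySem.Int.floordiv n (a0 * a0 * b)).toNat : Nat) : Int) with hlimdef
  set bc := PySem.List.bisectRight ps lim with hbcdef
  have hbcle : bc ≤ ps.length := bisect_le_length hs lim
  have hjbc : j < bc := by
    apply (bisect_iff hs lim hj).mp
    show b ≤ lim
    rw [hlimdef]
    refine (limit_iff b hapos hbpos (by linarith) hn0).mp ?_
    nlinarith [hpred]
  have hF : (∑ k ∈ Finset.range ps.length, tri ps n i j k) = ((bc - (j + 1) : Nat) : Int) := by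
    unfold tri
    apply sum_ite_interval _ _ _ hbcle
    intro k hkN
    constructor
    · rintro ⟨hij2, hjk, hcond⟩
      have hcge : (0:ℤ) ≤ ps.getD k 0 := by
        have := getD_ge2 h2 hkN; linarith
      have hlim : ps.getD k 0 ≤ lim := by
        rw [hlimdef]
        exact (limit_iff (ps.getD k 0) hapos hbpos hcge hn0).mp hcond
      exact ⟨by omega, (bisect_iff hs lim hkN).mp hlim⟩
    · rintro ⟨hlo, hhi2⟩
      have hlim : ps.getD k 0 ≤ lim := (bisect_iff hs lim hkN).mpr hhi2
      have hcge : (0:ℤ) ≤ ps.getD k 0 := by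
        have := getD_ge2 h2 hkN; linarith
      refine ⟨hij, by omega, ?_⟩
      rw [hlimdef] at hlim
      exact (limit_iff (ps.getD k 0) hapos hbpos hcge hn0).mpr hlim
  rw [hF]
  omega

-- B's whole loop nest equals the triple sum (j outermost)
lemma pvBLoop_eq {ps : List Int} (hs : ps.Pairwise (· < ·)) (h2 : ∀ x ∈ ps, 2 ≤ x) (n : Int) :
    pvBLoop ps n = ∑ j ∈ Finset.range ps.length, ∑ i ∈ Finset.range ps.length,
        ∑ k ∈ Finset.range ps.length, tri ps n i j k := by
  have hMN : (pvBMids ps n).length ≤ ps.length := tw_length_le ps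
  have h1 : pvBLoop ps n = ∑ j ∈ Finset.range (pvBMids ps n).length,
      ((pvBSmalls ps n ((pvBMids ps n).getD j 0) j).map
        (pvBCount ps n ((pvBMids ps n).getD j 0) j)).sum := by
    unfold pvBLoop
    rw [foldl_add_gen _
        (fun j => ((pvBSmalls ps n ((pvBMids ps n).getD j 0) j).map
          (pvBCount ps n ((pvBMids ps n).getD j 0) j)).sum)
        (fun r j => foldl_add_gen _ _ (fun r' a => rfl) _ r) _ 0,
      zero_add, sum_map_range]
  rw [h1]
  have hS : ∀ j < (pvBMids ps n).length,
      ((pvBSmalls ps n ((pvBMids ps n).getD j 0) j).map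
        (pvBCount ps n ((pvBMids ps n).getD j 0) j)).sum
        = ∑ i ∈ Finset.range ps.length, ∑ k ∈ Finset.range ps.length, tri ps n i j k := by
    intro j hjM
    have hjN : j < ps.length := lt_of_lt_of_le hjM hMN
    have hb : (pvBMids ps n).getD j 0 = ps.getD j 0 := tw_getD hjM
    rw [hb]
    have hb2 : 2 ≤ ps.getD j 0 := getD_ge2 h2 hjN
    have hLle : (pvBSmalls ps n (ps.getD j 0) j).length ≤ j := by
      have h := tw_length_le (p := fun a => decide (a * a * (ps.getD j 0) * ((ps.getD j 0) + 1) ^ 2 ≤ n)) (ps.take j)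
      calc (pvBSmalls ps n (ps.getD j 0) j).length ≤ (ps.take j).length := h
        _ ≤ j := by simp [List.length_take]
    rw [map_sum_getD]
    have hterm : ∀ i ∈ Finset.range (pvBSmalls ps n (ps.getD j 0) j).length,
        pvBCount ps n (ps.getD j 0) j ((pvBSmalls ps n (ps.getD j 0) j).getD i 0)
          = ∑ k ∈ Finset.range ps.length, tri ps n i j k := by
      intro i hi
      have hiL : i < (pvBSmalls ps n (ps.getD j 0) j).length := Finset.mem_range.mp hi
      have hij : i < j := lt_of_lt_of_le hiL hLle
      have hiN : i < ps.length := lt_trans hij hjN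
      have hgd : (pvBSmalls ps n (ps.getD j 0) j).getD i 0 = ps.getD i 0 := by
        rw [show (pvBSmalls ps n (ps.getD j 0) j).getD i 0
              = (ps.take j).getD i 0 from tw_getD hiL]
        exact getD_take ps j i hij hiN
      have hpd := tw_holds (l := ps.take j) hiL
      rw [getD_take ps j i hij hiN] at hpd
      have hpred : ps.getD i 0 * ps.getD i 0 * ps.getD j 0 * (ps.getD j 0 + 1) ^ 2 ≤ n :=
        of_decide_eq_true hpd
      rw [hgd]
      exact (countK hs h2 hij hjN hpred).symm
    rw [Finset.sum_congr rfl hterm]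
    apply Finset.sum_subset
    · intro x hx
      rw [Finset.mem_range] at *
      omega
    · intro i hiN' hiL'
      rw [Finset.mem_range] at hiN'
      rw [Finset.mem_range, not_lt] at hiL'
      apply Finset.sum_eq_zero
      intro k hk
      rw [Finset.mem_range] at hk
      unfold tri
      rw [if_neg]
      rintro ⟨hij, hjk, hcond⟩
      have hLltj : (pvBSmalls ps n (ps.getD j 0) j).length < (ps.take j).length := by
        simp only [List.length_take]
        omega
      have hfail := tw_stop (p := fun a => decide (a * a * (ps.getD j 0) * ((ps.getD j 0) + 1) ^ 2 ≤ n)) (ps.take j) hLltj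
      have hlen2 : ((ps.take j).takeWhile
          (fun a => decide (a * a * (ps.getD j 0) * ((ps.getD j 0) + 1) ^ 2 ≤ n))).length
          = (pvBSmalls ps n (ps.getD j 0) j).length := rfl
      rw [hlen2] at hfail
      rw [getD_take ps j _ (by omega) (by omega)] at hfail
      have hbrk : ps.getD (pvBSmalls ps n (ps.getD j 0) j).length 0
          * ps.getD (pvBSmalls ps n (ps.getD j 0) j).length 0
          * ps.getD j 0 * (ps.getD j 0 + 1) ^ 2 > n :=
        lt_of_not_ge (of_decide_eq_false hfail)
      have := arithB_inner (getD_ge2 h2 (show (pvBSmalls ps n (ps.getD j 0) j).length < ps.length by omega))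
        (getD_mono hs hiL' hiN') hb2 (getD_strict hs hjk hk) hbrk
      linarith
  rw [Finset.sum_congr rfl (fun j hj => hS j (Finset.mem_range.mp hj))]
  apply Finset.sum_subset
  · intro x hx
    rw [Finset.mem_range] at *
    omega
  · intro j hjN hjM
    rw [Finset.mem_range] at hjN
    rw [Finset.mem_range, not_lt] at hjM
    apply Finset.sum_eq_zero
    intro i hi
    apply Finset.sum_eq_zero
    intro k hk
    rw [Finset.mem_range] at hi hk
    unfold tri
    rw [if_neg]
    rintro ⟨hij, hjk, hcond⟩
    have hMlt : (pvBMids ps n).length < ps.length := lt_of_le_of_lt hjM hjN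
    have hfail := tw_stop (p := fun b => decide (4 * b * (b + 1) ^ 2 ≤ n)) ps hMlt
    have hlen3 : (ps.takeWhile (fun b => decide (4 * b * (b + 1) ^ 2 ≤ n))).length
        = (pvBMids ps n).length := rfl
    rw [hlen3] at hfail
    have hbrk : 4 * ps.getD (pvBMids ps n).length 0
        * (ps.getD (pvBMids ps n).length 0 + 1) ^ 2 > n :=
      lt_of_not_ge (of_decide_eq_false hfail)
    have := arithB_outer (getD_ge2 h2 hi) (getD_ge2 h2 hMlt)
      (getD_mono hs hjM hjN) (getD_strict hs hjk hk) hbrk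
    linarith

lemma sides_eq {ps : List Int} (hs : ps.Pairwise (· < ·)) (h2 : ∀ x ∈ ps, 2 ≤ x) (n : Int) :
    solveAOuter ps n 2 0 = pvBLoop ps n := by
  rw [outerA_eq hs h2 n 2 0, pvBLoop_eq hs h2 n, zero_add]
  have hA : ∑ k ∈ Finset.Ico 2 ps.length, ∑ i ∈ Finset.range ps.length,
      ∑ j ∈ Finset.range ps.length, tri ps n i j k
      = ∑ k ∈ Finset.range ps.length, ∑ i ∈ Finset.range ps.length,
          ∑ j ∈ Finset.range ps.length, tri ps n i j k := by
    apply Finset.sum_subset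
    · intro k hk
      rw [Finset.mem_Ico] at hk
      rw [Finset.mem_range]
      exact hk.2
    · intro k hk hknot
      rw [Finset.mem_range] at hk
      rw [Finset.mem_Ico] at hknot
      apply Finset.sum_eq_zero
      intro i _
      apply Finset.sum_eq_zero
      intro j _
      unfold tri
      rw [if_neg]
      rintro ⟨hij, hjk, -⟩
      omega
  rw [hA]
  calc ∑ k ∈ Finset.range ps.length, ∑ i ∈ Finset.range ps.length,
        ∑ j ∈ Finset.range ps.length, tri ps n i j k
      = ∑ k ∈ Finset.range ps.length, ∑ j ∈ Finset.range ps.length,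
          ∑ i ∈ Finset.range ps.length, tri ps n i j k :=
        Finset.sum_congr rfl (fun k _ => Finset.sum_comm)
    _ = ∑ j ∈ Finset.range ps.length, ∑ k ∈ Finset.range ps.length,
          ∑ i ∈ Finset.range ps.length, tri ps n i j k := Finset.sum_comm
    _ = ∑ j ∈ Finset.range ps.length, ∑ i ∈ Finset.range ps.length,
          ∑ k ∈ Finset.range ps.length, tri ps n i j k :=
        Finset.sum_congr rfl (fun j _ => Finset.sum_comm)

-- ---- properties of the sieve output: strictly increasing, all elements ≥ 2 ----
lemma setIfInBounds_getD_zero (a : Array Int) (i j : Nat) (h : a.getD j 0 = 0) :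
    (a.setIfInBounds i (0 : Int)).getD j 0 = 0 := by
  simp only [Array.getD_eq_getD_getElem?, Array.getElem?_setIfInBounds] at *
  split
  · split <;> simp_all
  · exact h

lemma foldl_set_getD_zero (l : List Int) (a : Array Int) (j : Nat) (h : a.getD j 0 = 0) :
    ((l.foldl (fun a q => a.setIfInBounds q.toNat 0) a).getD j 0) = 0 := by
  induction l generalizing a with
  | nil => exact h
  | cons q l ih => exact ih _ (setIfInBounds_getD_zero _ _ _ h)

lemma sieveStep_getD_zero (a : Array Int) (p j : Nat) (h : a.getD j 0 = 0) :
    (pvSieveStep a p).getD j 0 = 0 := by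
  unfold pvSieveStep
  split
  · exact foldl_set_getD_zero _ _ _ h
  · exact h

lemma foldl_sieve_getD_zero (l : List Nat) (a : Array Int) (j : Nat) (h : a.getD j 0 = 0) :
    ((l.foldl pvSieveStep a).getD j 0) = 0 := by
  induction l generalizing a with
  | nil => exact h
  | cons p l ih => exact ih _ (sieveStep_getD_zero _ _ _ h)

lemma init_getD_zero (j : Nat) (hj : j = 0 ∨ j = 1) :
    ((((Array.replicate 1000000 (1 : Int)).setIfInBounds 0 0).setIfInBounds 1 0).getD j 0) = 0 := by
  rcases hj with rfl | rfl <;>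
    simp [Array.getD_eq_getD_getElem?]

lemma pvSieveArr_01 : pvSieveArr.getD 0 0 = 0 ∧ pvSieveArr.getD 1 0 = 0 :=
  ⟨foldl_sieve_getD_zero _ _ _ (init_getD_zero 0 (Or.inl rfl)),
   foldl_sieve_getD_zero _ _ _ (init_getD_zero 1 (Or.inr rfl))⟩

set_option maxRecDepth 4096 in
lemma pvPrimes_sorted : pvPrimes.Pairwise (· < ·) := by
  unfold pvPrimes
  exact List.Pairwise.map (fun p : Nat => (p : Int))
    (fun a b hab => by simpa using hab)
    ((List.pairwise_lt_range).filter (fun p => pvSieveArr.getD p 0 != 0))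

set_option maxRecDepth 4096 in
lemma pvPrimes_ge2 : ∀ x ∈ pvPrimes, 2 ≤ x := by
  intro x hx
  rw [pvPrimes, List.mem_map] at hx
  obtain ⟨p, hp, rfl⟩ := hx
  rw [List.mem_filter] at hp
  obtain ⟨-, hpred⟩ := hp
  have h0 : p ≠ 0 := by
    rintro rfl
    rw [pvSieveArr_01.1] at hpred
    simp at hpred
  have h1 : p ≠ 1 := by
    rintro rfl
    rw [pvSieveArr_01.2] at hpred
    simp at hpred
  have : 2 ≤ p := by omega
  exact_mod_cast this

-- ===== VERDICT (by name: the statement is the Claim_ definition above) =====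
theorem solve_spec : Claim_equal_solve := by
  intro n _
  unfold Spec_solve solve solve_alt
  exact sides_eq pvPrimes_sorted pvPrimes_ge2 n
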